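-- pv_equiv track=rewrite | github.com/fmatyas00/jedlikprojektek | Fábián_Mátyás_10A_07_robot/main.py | utasitasok_szama
-- ===== SOURCE A (Python) =====
-- def utasitasok_szama(utasitas: str) -> list[int]:
--     E_szam: int = 0
--     D_szam: int = 0
--     K_szam: int = 0
--     N_szam: int = 0
--     for i in utasitas.upper():
--         if i == "E":
--             E_szam += 1
--         elif i == "D":
--             D_szam += 1
--         elif i == "K":
--             K_szam += 1
--         elif i == "N":
--             N_szam += 1
--     parancs_lista: list[int] = [E_szam, D_szam, K_szam, N_szam]
--     return parancs_lista
-- ===== SOURCE B (Python) =====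
-- def utasitasok_szama(utasitas: str) -> list[int]:
--     u = utasitas.upper()
--     return [u.count(c) for c in "EDKN"]
-- ===== Notes on version B (the rewrite author's own statement) =====
-- stated objective: idiomatic
-- what changed: A's single accumulating pass with an if/elif chain over four counters is replaced by uppercasing once and computing each of the four counts independently with str.count, one scan per command letter.
import Mathlib
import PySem

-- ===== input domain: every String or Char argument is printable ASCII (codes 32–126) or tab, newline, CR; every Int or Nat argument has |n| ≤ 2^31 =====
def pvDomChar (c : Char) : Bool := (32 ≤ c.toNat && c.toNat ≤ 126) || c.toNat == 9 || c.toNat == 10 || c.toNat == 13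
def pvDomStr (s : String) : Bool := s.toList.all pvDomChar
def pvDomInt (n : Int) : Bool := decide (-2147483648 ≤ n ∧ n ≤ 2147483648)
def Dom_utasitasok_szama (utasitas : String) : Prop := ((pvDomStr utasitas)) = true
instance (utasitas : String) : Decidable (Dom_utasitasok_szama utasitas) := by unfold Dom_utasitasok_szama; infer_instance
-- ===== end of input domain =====

-- B uppercases once and computes each of the four counts independently with str.count
-- (one scan per command letter), instead of A's single accumulating pass with an if/elif chain.

-- ===== PORT A =====
-- the body of A's for-loop (one if/elif step on the four counters)
def stepA (acc : Int × Int × Int × Int) (i : Char) : Int × Int × Int × Int :=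
  if i == 'E' then (acc.1 + 1, acc.2.1, acc.2.2.1, acc.2.2.2)
  else if i == 'D' then (acc.1, acc.2.1 + 1, acc.2.2.1, acc.2.2.2)
  else if i == 'K' then (acc.1, acc.2.1, acc.2.2.1 + 1, acc.2.2.2)
  else if i == 'N' then (acc.1, acc.2.1, acc.2.2.1, acc.2.2.2 + 1)
  else acc

def utasitasok_szama (utasitas : String) : List Int :=
  let st := (PySem.Str.upper utasitas).toList.foldl stepA (0, 0, 0, 0)
  [st.1, st.2.1, st.2.2.1, st.2.2.2]

-- ===== PORT B =====
def utasitasok_szama_alt (utasitas : String) : List Int :=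
  let u := PySem.Str.upper utasitas
  ("EDKN".toList).map (fun c => (PySem.Str.count u (String.singleton c) : Int))

-- ===== PRECONDITION & SPEC =====
def Spec_utasitasok_szama (utasitas : String) (out : List Int) : Prop := out = utasitasok_szama_alt utasitas
instance (utasitas : String) (out : List Int) : Decidable (Spec_utasitasok_szama utasitas out) := by unfold Spec_utasitasok_szama; infer_instance

-- ===== CLAIM (what is proved, stated in full; the proofs are below) =====
def Claim_equal_utasitasok_szama : Prop := ∀ (utasitas : String), Dom_utasitasok_szama utasitas → Spec_utasitasok_szama utasitas (utasitasok_szama utasitas)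

-- ===== LEMMAS AND PROOFS =====

-- str.count with a one-character needle is the character count
theorem count_go_singleton (c : Char) : ∀ (fuel : Nat) (l : List Char) (acc : Nat),
    l.length ≤ fuel → PySem.Chars.count.go [c] fuel l acc = acc + l.count c := by
  intro fuel
  induction fuel with
  | zero =>
    intro l acc h
    cases l with
    | nil => simp [PySem.Chars.count.go]
    | cons a t => simp at h
  | succ n ih =>
    intro l acc h
    cases l with
    | nil => simp [PySem.Chars.count.go]
    | cons a t =>
      simp only [PySem.Chars.count.go]
      by_cases hc : a = c
      · simp [hc, List.isPrefixOf, ih t (acc + 1) (by simpa using h)]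
        omega
      · simp [List.isPrefixOf, hc, Ne.symm hc, ih t acc (by simpa using h)]

theorem count_singleton (s : List Char) (c : Char) :
    PySem.Chars.count s [c] = s.count c := by
  simp [PySem.Chars.count, List.isEmpty, count_go_singleton c s.length s 0 le_rfl]

-- A's fold computes the four character counts
theorem foldA_eq (l : List Char) : ∀ (e d k n : Int),
    l.foldl stepA (e, d, k, n)
    = (e + l.count 'E', d + l.count 'D', k + l.count 'K', n + l.count 'N') := by
  induction l with
  | nil => simp
  | cons a t ih =>
    intro e d k n
    rw [List.foldl_cons]
    by_cases h1 : a = 'E'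
    · rw [show stepA (e, d, k, n) a = (e + 1, d, k, n) from by simp [stepA, h1], ih]
      simp [Prod.ext_iff, h1]
      omega
    · by_cases h2 : a = 'D'
      · rw [show stepA (e, d, k, n) a = (e, d + 1, k, n) from by simp [stepA, h2], ih]
        simp [Prod.ext_iff, h2]
        omega
      · by_cases h3 : a = 'K'
        · rw [show stepA (e, d, k, n) a = (e, d, k + 1, n) from by simp [stepA, h3], ih]
          simp [Prod.ext_iff, h3]
          omega
        · by_cases h4 : a = 'N'
          · rw [show stepA (e, d, k, n) a = (e, d, k, n + 1) from by simp [stepA, h4], ih]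
            simp [Prod.ext_iff, h4]
            omega
          · rw [show stepA (e, d, k, n) a = (e, d, k, n) from by simp [stepA, h1, h2, h3, h4], ih]
            simp [h1, h2, h3, h4]

-- ===== VERDICT (by name: the statement is the Claim_ definition above) =====
theorem utasitasok_szama_spec : Claim_equal_utasitasok_szama := by
  intro u _
  unfold Spec_utasitasok_szama utasitasok_szama utasitasok_szama_alt
  rw [show ((0, 0, 0, 0) : Int × Int × Int × Int) = (0, 0, 0, 0) from rfl, foldA_eq]
  simp [PySem.Str.count_eq, String.singleton, count_singleton]
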